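-- pv_equiv track=rewrite | github.com/Yxggla/FaceMood | train/dataset.py | _balanced_indices
-- ===== SOURCE A (Python) =====
-- from collections import defaultdict
--
-- def _balanced_indices(targets: list[int], limit: int) -> list[int]:
--     by_class: dict[int, list[int]] = defaultdict(list)
--     for index, target in enumerate(targets):
--         by_class[int(target)].append(index)
--
--     selected: list[int] = []
--     class_ids = sorted(by_class)
--     offset = 0
--     while len(selected) < min(limit, len(targets)):
--         added = False
--         for class_id in class_ids:
--             items = by_class[class_id]
--             if offset < len(items):
--                 selected.append(items[offset])
--                 added = True
--                 if len(selected) >= limit: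
--                     break
--         if not added:
--             break
--         offset += 1
--     return selected
-- ===== SOURCE B (Python) =====
-- def _balanced_indices(targets: list[int], limit: int) -> list[int]:
--     seen: dict[int, int] = {}
--     keyed: list[tuple[int, int, int]] = []
--     for i, t in enumerate(targets):
--         t = int(t)
--         r = seen.get(t, 0)
--         seen[t] = r + 1
--         keyed.append((r, t, i))
--     keyed.sort(key=lambda p: (p[0], p[1]))
--     return [i for _, _, i in keyed[:max(0, limit)]]
-- ===== Notes on version B (the rewrite author's own statement) =====
-- stated objective: alternative
-- what changed: B has no round-robin loop at all: it decorates each index with its within-class occurrence rank in one pass over the input, sorts the (rank, class, index) triples by (rank, class), and slices off the first limit indices; A instead groups indices into per-class buckets and repeatedly rescans all class ids offset by offset.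
import Mathlib
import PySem

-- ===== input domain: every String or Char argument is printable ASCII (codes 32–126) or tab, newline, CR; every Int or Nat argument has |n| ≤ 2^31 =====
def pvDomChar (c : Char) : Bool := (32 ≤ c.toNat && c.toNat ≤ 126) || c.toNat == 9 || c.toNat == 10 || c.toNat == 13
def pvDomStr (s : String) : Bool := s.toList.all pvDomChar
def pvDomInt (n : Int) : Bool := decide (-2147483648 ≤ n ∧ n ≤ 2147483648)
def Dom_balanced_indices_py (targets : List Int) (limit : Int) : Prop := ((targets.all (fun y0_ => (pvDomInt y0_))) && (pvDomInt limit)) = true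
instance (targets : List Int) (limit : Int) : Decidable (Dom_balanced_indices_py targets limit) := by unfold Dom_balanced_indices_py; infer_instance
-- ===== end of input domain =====

-- B drops A's round-robin offset loop entirely: one pass decorates each index with its
-- within-class occurrence rank, the triples (rank, class, index) are sorted by
-- (rank, class), and the first `limit` indices are sliced off.

-- ===== PORT A =====
-- by_class: defaultdict(list); by_class[int(target)].append(index)  ==  modify t [] (· ++ [i])
def pvBuild (targets : List Int) : PySem.Dict Int (List Int) :=
  (PySem.List.enumerate targets 0).foldl
    (fun d p => d.modify p.2 [] (fun v => v ++ [p.1])) PySem.Dict.empty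

-- the inner `for class_id in class_ids` loop; returns (selected, added); breaks on limit
-- items[offset] is guarded by offset < len(items), so items.getD k 0 is exact here
def pvInnerA (d : PySem.Dict Int (List Int)) (limit : Int) (k : Nat) :
    List Int → List Int → Bool → List Int × Bool
  | [], sel, added => (sel, added)
  | c :: rest, sel, added =>
    let items := d.getD c []
    if k < items.length then
      let sel' := sel ++ [items.getD k 0]
      if limit ≤ (sel'.length : Int) then (sel', true)
      else pvInnerA d limit k rest sel' true
    else pvInnerA d limit k rest sel added

-- the `while len(selected) < min(limit, len(targets))` loop; fuel n+1 always suffices: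
-- every iteration that continues appends at least one element and entered with length < n
def pvLoopA (d : PySem.Dict Int (List Int)) (cids : List Int) (limit : Int) (n : Nat) :
    Nat → List Int → Nat → List Int
  | 0, sel, _ => sel
  | fuel + 1, sel, k =>
    if (sel.length : Int) < min limit (n : Int) then
      let r := pvInnerA d limit k cids sel false
      if r.2 then pvLoopA d cids limit n fuel r.1 (k + 1) else r.1
    else sel

def balanced_indices_py (targets : List Int) (limit : Int) : List Int :=
  let d := pvBuild targets
  let cids := PySem.List.sorted d.keys (fun x => x) false
  pvLoopA d cids limit targets.length (targets.length + 1) [] 0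

-- ===== PORT B =====
-- the decorating pass: seen.get(t, 0) == getD, seen[t] = r + 1 == insert, append the triple
def pvKeyedStep (st : PySem.Dict Int Int × List (Int × Int × Int)) (p : Int × Int) :
    PySem.Dict Int Int × List (Int × Int × Int) :=
  let r := st.1.getD p.2 0
  (st.1.insert p.2 (r + 1), st.2 ++ [(r, p.2, p.1)])

def pvKeyed (targets : List Int) : List (Int × Int × Int) :=
  ((PySem.List.enumerate targets 0).foldl pvKeyedStep (PySem.Dict.empty, [])).2

-- keyed.sort(key=lambda p: (p[0], p[1])); return [i for _, _, i in keyed[:max(0, limit)]]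
def balanced_indices_py_alt (targets : List Int) (limit : Int) : List Int :=
  let keyed := PySem.List.sorted2 (pvKeyed targets) (fun p => p.1) (fun p => p.2.1) false
  (PySem.List.slice keyed none (some (max 0 limit))).map (fun p => p.2.2)

-- ===== PRECONDITION & SPEC =====
def Spec_balanced_indices_py (targets : List Int) (limit : Int) (out : List Int) : Prop := out = balanced_indices_py_alt targets limit
instance (targets : List Int) (limit : Int) (out : List Int) : Decidable (Spec_balanced_indices_py targets limit out) := by unfold Spec_balanced_indices_py; infer_instance

-- ===== CLAIM (what is proved, stated in full; the proofs are below) =====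
def Claim_equal_balanced_indices_py : Prop := ∀ (targets : List Int) (limit : Int), Dom_balanced_indices_py targets limit → Spec_balanced_indices_py targets limit (balanced_indices_py targets limit)

-- ===== LEMMAS AND PROOFS =====

-- the elements picked at offset k, in class-id order
def pvRound (d : PySem.Dict Int (List Int)) (cids : List Int) (k : Nat) : List Int :=
  (cids.filter (fun c => decide (k < (d.getD c []).length))).map
    (fun c => (d.getD c []).getD k 0)

-- all rounds from offset k on, stopping at the first empty round
def pvRounds (d : PySem.Dict Int (List Int)) (cids : List Int) : Nat → Nat → List Int
  | _, 0 => []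
  | k, fuel + 1 =>
    if pvRound d cids k = [] then []
    else pvRound d cids k ++ pvRounds d cids (k + 1) fuel

-- the round at offset k, decorated as (offset, class, element) triples
def pvTriRound (d : PySem.Dict Int (List Int)) (cids : List Int) (k : Nat) :
    List (Int × Int × Int) :=
  (cids.filter (fun c => decide (k < (d.getD c []).length))).map
    (fun c => ((k : Int), c, (d.getD c []).getD k 0))

def pvTriRounds (d : PySem.Dict Int (List Int)) (cids : List Int) :
    Nat → Nat → List (Int × Int × Int)
  | _, 0 => []
  | k, fuel + 1 =>
    if pvTriRound d cids k = [] then []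
    else pvTriRound d cids k ++ pvTriRounds d cids (k + 1) fuel

-- the triple B's decorating pass produces for index j
def pvTriple (targets : List Int) (j : Nat) : Int × Int × Int :=
  (((targets.take j).count (targets.getD j 0) : Int), targets.getD j 0, (j : Int))

-- the comparison sorted2 uses (strict lexicographic on the first two components)
def pvBefore (a b : Int × Int × Int) : Bool :=
  decide (a.1 < b.1) || (!decide (b.1 < a.1) && decide (a.2.1 < b.2.1))

def pvLex (a b : Int × Int × Int) : Prop :=
  a.1 < b.1 ∨ (a.1 = b.1 ∧ a.2.1 < b.2.1)

lemma innerA_spec (d : PySem.Dict Int (List Int)) (limit : Int) (k : Nat) :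
    ∀ (cids sel : List Int) (added : Bool), (sel.length : Int) < limit →
      pvInnerA d limit k cids sel added =
        (sel ++ (pvRound d cids k).take (limit.toNat - sel.length),
         added || !(pvRound d cids k).isEmpty) := by
  intro cids
  induction cids with
  | nil => intro sel added h; simp [pvInnerA, pvRound]
  | cons c rest ih =>
    intro sel added h
    by_cases hk : k < (d.getD c []).length
    · have hround : pvRound d (c :: rest) k =
          (d.getD c []).getD k 0 :: pvRound d rest k := by
        simp [pvRound, hk]
      by_cases hlim : limit ≤ ((sel ++ [(d.getD c []).getD k 0]).length : Int)
      · have hm : limit.toNat - sel.length = 1 := by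
          simp only [List.length_append, List.length_cons, List.length_nil] at hlim; omega
        have hstep : pvInnerA d limit k (c :: rest) sel added
            = (sel ++ [(d.getD c []).getD k 0], true) := by
          simp [pvInnerA, hk]
          intro h2
          exfalso
          simp only [List.length_append, List.length_cons, List.length_nil] at hlim
          omega
        rw [hstep, hround, hm]
        simp
      · have hlen : ((sel ++ [(d.getD c []).getD k 0]).length : Int) < limit := by
          omega
        have := ih (sel ++ [(d.getD c []).getD k 0]) true hlen
        simp only [pvInnerA, if_pos hk, if_neg hlim] at *
        rw [this, hround]
        obtain ⟨m', hm'⟩ : ∃ m', limit.toNat - sel.length = m' + 1 :=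
          ⟨limit.toNat - sel.length - 1, by omega⟩
        have hm'' : limit.toNat - (sel ++ [(d.getD c []).getD k 0]).length = m' := by
          simp only [List.length_append, List.length_cons, List.length_nil]
          simp only [List.length_append, List.length_cons, List.length_nil] at hlim
          omega
        rw [hm', hm'', List.take_succ_cons]
        simp
    · have hround : pvRound d (c :: rest) k = pvRound d rest k := by
        simp [pvRound, hk]
      simp only [pvInnerA, if_neg hk, hround]
      exact ih sel added h

lemma loopA_spec (d : PySem.Dict Int (List Int)) (cids : List Int) (limit : Int) (n : Nat) :
    ∀ (fuel k : Nat) (sel : List Int),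
      sel.length + (pvRounds d cids k fuel).length ≤ n →
      pvLoopA d cids limit n fuel sel k =
        sel ++ (pvRounds d cids k fuel).take (limit.toNat - sel.length) := by
  intro fuel
  induction fuel with
  | zero => intro k sel _; simp [pvLoopA, pvRounds]
  | succ fuel ih =>
    intro k sel H
    by_cases hc : (sel.length : Int) < min limit (n : Int)
    · have hlim : (sel.length : Int) < limit := lt_of_lt_of_le hc (min_le_left _ _)
      by_cases hr : pvRound d cids k = []
      · have : pvRounds d cids k (fuel + 1) = [] := by simp [pvRounds, hr]
        simp [pvLoopA, hc, innerA_spec d limit k cids sel false hlim, hr, this]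
      · have hrounds : pvRounds d cids k (fuel + 1) =
            pvRound d cids k ++ pvRounds d cids (k + 1) fuel := by
          simp [pvRounds, hr]
        have hinner := innerA_spec d limit k cids sel false hlim
        simp only [pvLoopA, if_pos hc, hinner, Bool.false_or]
        have hsnd : (!(pvRound d cids k).isEmpty) = true := by
          simp [hr]
        rw [hsnd]
        rw [hrounds] at H
        simp only [List.length_append] at H
        have H' : (sel ++ (pvRound d cids k).take (limit.toNat - sel.length)).length +
            (pvRounds d cids (k + 1) fuel).length ≤ n := by
          simp only [List.length_append, List.length_take]; omega
        rw [ih (k + 1) _ H']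
        have hcount : limit.toNat -
            (sel ++ (pvRound d cids k).take (limit.toNat - sel.length)).length
            = (limit.toNat - sel.length) - (pvRound d cids k).length := by
          have hl : (sel.length : Int) < limit := hlim
          simp only [List.length_append, List.length_take]
          omega
        rw [hcount, hrounds, List.take_append, ← List.append_assoc]
        simp only [if_pos trivial]
    · have hstop : List.take (limit.toNat - sel.length) (pvRounds d cids k (fuel + 1)) = [] := by
        by_cases hl : limit ≤ (sel.length : Int)
        · have : limit.toNat - sel.length = 0 := by omega
          simp [this]
        · have hn : (n : Int) ≤ (sel.length : Int) := by omega
          have : (pvRounds d cids k (fuel + 1)).length = 0 := by omega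
          simp [List.length_eq_zero_iff.mp this]
      simp [pvLoopA, hc, hstop]

lemma build_getD_aux (c : Int) :
    ∀ (l : List (Int × Int)) (d : PySem.Dict Int (List Int)),
      (l.foldl (fun d p => d.modify p.2 [] (fun v => v ++ [p.1])) d).getD c [] =
        d.getD c [] ++ (l.filter (fun p => p.2 == c)).map (·.1) := by
  intro l
  induction l with
  | nil => intro d; simp
  | cons p l ih =>
    intro d
    simp only [List.foldl_cons, ih, List.filter_cons]
    by_cases h : p.2 = c
    · simp [h]
    · have hb : (p.2 == c) = false := by simp [h]
      simp [hb, PySem.Dict.getD_modify]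
      intro hc
      exact absurd hc.symm h

lemma bucket_len (targets : List Int) (c : Int) :
    ((pvBuild targets).getD c []).length = targets.count c := by
  have countP_enum : ∀ (xs : List Int) (s : Int),
      ((PySem.List.enumerate xs s).filter (fun p => p.2 == c)).length = xs.count c := by
    intro xs
    induction xs with
    | nil => intro s; simp [PySem.List.enumerate_nil]
    | cons x xs ih =>
      intro s
      rw [PySem.List.enumerate_cons]
      by_cases h : x = c <;>
        simp [h, ih (s + 1)]
  unfold pvBuild
  rw [build_getD_aux]
  simp [countP_enum]

lemma keys_build (targets : List Int) :
    (pvBuild targets).keys = PySem.Set.ofList targets := by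
  unfold pvBuild
  rw [PySem.Dict.keys_foldl_modify_key]
  simp [PySem.Set.update_nil_left, PySem.List.map_snd_enumerate]

lemma rounds_le (d : PySem.Dict Int (List Int)) (cids : List Int) :
    ∀ (fuel k : Nat),
      (pvRounds d cids k fuel).length ≤
        (cids.map (fun c => (d.getD c []).length - k)).sum := by
  have step : ∀ (cs : List Int) (k : Nat),
      (pvRound d cs k).length +
        (cs.map (fun c => (d.getD c []).length - (k + 1))).sum ≤
      (cs.map (fun c => (d.getD c []).length - k)).sum := by
    intro cs k
    induction cs with
    | nil => simp [pvRound]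
    | cons c cs ih =>
      by_cases hk : k < (d.getD c []).length
      · simp [pvRound, hk, List.sum_cons] at ih ⊢
        omega
      · simp [pvRound, hk, List.sum_cons] at ih ⊢
        omega
  intro fuel
  induction fuel with
  | zero => intro k; simp [pvRounds]
  | succ fuel ih =>
    intro k
    by_cases hr : pvRound d cids k = []
    · simp [pvRounds, hr]
    · simp only [pvRounds, if_neg hr, List.length_append]
      have := ih (k + 1)
      have := step cids k
      omega

lemma sum_buckets_le (targets : List Int) :
    ((PySem.List.sorted (pvBuild targets).keys (fun x => x) false).map
        (fun c => ((pvBuild targets).getD c []).length)).sum ≤ targets.length := by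
  rw [((PySem.List.sorted_perm (pvBuild targets).keys (fun x => x) false).map
    (fun c => ((pvBuild targets).getD c []).length)).sum_eq]
  rw [keys_build]
  have hp : (PySem.Set.ofList targets).Perm targets.dedup := by
    rw [List.perm_ext_iff_of_nodup (PySem.Set.nodup_ofList targets) targets.nodup_dedup]
    intro a
    simp [PySem.Set.mem_ofList, List.mem_dedup]
  rw [(hp.map (fun c => ((pvBuild targets).getD c []).length)).sum_eq]
  have : (targets.dedup.map (fun c => ((pvBuild targets).getD c []).length)) =
      (targets.dedup.map (fun c => targets.count c)) := by
    apply List.map_congr_left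
    intro c _
    exact bucket_len targets c
  rw [this, List.sum_map_count_dedup_eq_length]

-- ========== B-side lemmas ==========

-- pvRounds is the third projection of pvTriRounds
lemma round_eq_tri (d : PySem.Dict Int (List Int)) (cids : List Int) (k : Nat) :
    (pvTriRound d cids k).map (fun p => p.2.2) = pvRound d cids k := by
  simp [pvTriRound, pvRound, List.map_map, Function.comp]

lemma rounds_eq_tri (d : PySem.Dict Int (List Int)) (cids : List Int) :
    ∀ (fuel k : Nat),
      (pvTriRounds d cids k fuel).map (fun p => p.2.2) = pvRounds d cids k fuel := by
  intro fuel
  induction fuel with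
  | zero => intro k; simp [pvTriRounds, pvRounds]
  | succ fuel ih =>
    intro k
    have hempty : pvTriRound d cids k = [] ↔ pvRound d cids k = [] := by
      simp [pvTriRound, pvRound]
    by_cases hr : pvTriRound d cids k = []
    · simp [pvTriRounds, pvRounds, hr, hempty.mp hr]
    · have hr' : ¬ pvRound d cids k = [] := fun h => hr (hempty.mpr h)
      simp only [pvTriRounds, pvRounds, if_neg hr, if_neg hr', List.map_append,
        round_eq_tri, ih]

lemma enumerate_append (xs ys : List Int) :
    ∀ s : Int, PySem.List.enumerate (xs ++ ys) s =
      PySem.List.enumerate xs s ++ PySem.List.enumerate ys (s + xs.length) := by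
  induction xs with
  | nil => intro s; simp [PySem.List.enumerate_nil]
  | cons x xs ih =>
    intro s
    simp only [List.cons_append, PySem.List.enumerate_cons, ih (s + 1), List.length_cons]
    congr 2
    push_cast
    ring

-- closed form of B's decorating pass
lemma keyed_closed (targets : List Int) :
    pvKeyed targets = (List.range targets.length).map (pvTriple targets) := by
  suffices h : ∀ (ts : List Int),
      (∀ c : Int, ((PySem.List.enumerate ts 0).foldl pvKeyedStep (PySem.Dict.empty, [])).1.getD c 0
          = (ts.count c : Int)) ∧
      ((PySem.List.enumerate ts 0).foldl pvKeyedStep (PySem.Dict.empty, [])).2 =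
        (List.range ts.length).map (pvTriple ts) by
    exact (h targets).2
  intro ts
  induction ts using List.reverseRecOn with
  | nil =>
    refine ⟨?_, ?_⟩
    · intro c; simp [PySem.List.enumerate_nil]
    · simp [PySem.List.enumerate_nil]
  | append_singleton xs x ih =>
    obtain ⟨ihcnt, ihlst⟩ := ih
    rw [enumerate_append]
    simp only [List.foldl_append, PySem.List.enumerate_cons, PySem.List.enumerate_nil,
      List.foldl_cons, List.foldl_nil]
    set st := (PySem.List.enumerate xs 0).foldl pvKeyedStep (PySem.Dict.empty, []) with hst
    refine ⟨?_, ?_⟩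
    · intro c
      simp only [pvKeyedStep, PySem.Dict.getD_insert]
      by_cases hcx : c = x
      · subst hcx
        rw [if_pos rfl, ihcnt c, List.count_append]
        simp
      · rw [if_neg hcx, ihcnt c, List.count_append]
        have : [x].count c = 0 := by
          simp [List.count_singleton]
          exact fun h => absurd h.symm hcx
        rw [this]
        simp
    · simp only [pvKeyedStep]
      rw [ihlst, ihcnt x]
      have hlen : (xs ++ [x]).length = xs.length + 1 := by simp
      rw [hlen, List.range_succ, List.map_append]
      congr 1
      · apply List.map_congr_left
        intro j hj
        have hj' : j < xs.length := List.mem_range.mp hj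
        unfold pvTriple
        have h1 : (xs ++ [x]).getD j 0 = xs.getD j 0 := by
          rw [List.getD_eq_getElem?_getD, List.getD_eq_getElem?_getD,
            List.getElem?_append_left hj']
        have h2 : (xs ++ [x]).take j = xs.take j := by
          exact List.take_append_of_le_length (le_of_lt hj')
        rw [h1, h2]
      · simp only [List.map_cons, List.map_nil]
        unfold pvTriple
        have h1 : (xs ++ [x]).getD xs.length 0 = x := by
          rw [List.getD_eq_getElem?_getD, List.getElem?_append_right (le_refl _)]
          simp
        have h2 : (xs ++ [x]).take xs.length = xs := by
          rw [List.take_append_of_le_length (le_refl _), List.take_length]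
        rw [h1, h2]
        ring_nf

-- characterisation of the bucket entries: the r-th index of class c is the j with
-- exactly r earlier occurrences of c
lemma bucket_char (c : Int) :
    ∀ (xs : List Int) (s : Int) (r : Nat) (i : Int),
      (r < (((PySem.List.enumerate xs s).filter (fun p => p.2 == c)).map (·.1)).length ∧
        ((((PySem.List.enumerate xs s).filter (fun p => p.2 == c)).map (·.1)).getD r 0 = i))
      ↔ ∃ j : Nat, j < xs.length ∧ i = s + (j : Int) ∧ xs.getD j 0 = c ∧
          (xs.take j).count c = r := by
  intro xs
  induction xs with
  | nil => intro s r i; simp [PySem.List.enumerate_nil]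
  | cons t rest ih =>
    intro s r i
    rw [PySem.List.enumerate_cons]
    by_cases htc : t = c
    · subst htc
      simp only [List.filter_cons, beq_self_eq_true, if_true, List.map_cons]
      cases r with
      | zero =>
        simp only [List.length_cons, List.getD_cons_zero]
        constructor
        · rintro ⟨-, rfl⟩
          exact ⟨0, by simp⟩
        · rintro ⟨j, hj, rfl, hget, hcount⟩
          cases j with
          | zero => simp
          | succ j =>
            exfalso
            rw [List.take_succ_cons] at hcount
            simp at hcount
      | succ r =>
        simp only [List.length_cons, List.getD_cons_succ, Nat.add_lt_add_iff_right]
        rw [ih (s + 1) r i]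
        constructor
        · rintro ⟨j, hj, rfl, hget, hcount⟩
          refine ⟨j + 1, by simpa using hj, by push_cast; ring, by simpa using hget, ?_⟩
          rw [List.take_succ_cons]
          simp [hcount]
        · rintro ⟨j, hj, rfl, hget, hcount⟩
          cases j with
          | zero => simp at hcount
          | succ j =>
            rw [List.take_succ_cons] at hcount
            simp only [List.count_cons, beq_self_eq_true, if_true] at hcount
            refine ⟨j, by simpa using hj, by push_cast; ring, by simpa using hget, by omega⟩
    · have hbeq : (t == c) = false := by simpa using htc
      simp only [List.filter_cons, hbeq, if_neg Bool.false_ne_true]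
      rw [ih (s + 1) r i]
      constructor
      · rintro ⟨j, hj, rfl, hget, hcount⟩
        refine ⟨j + 1, by simpa using hj, by push_cast; ring, by simpa using hget, ?_⟩
        rw [List.take_succ_cons]
        simpa [List.count_cons, htc] using hcount
      · rintro ⟨j, hj, rfl, hget, hcount⟩
        cases j with
        | zero =>
          exfalso
          simp only [List.getD_cons_zero] at hget
          exact htc hget
        | succ j =>
          rw [List.take_succ_cons] at hcount
          have hcount' : (rest.take j).count c = r := by
            simpa [List.count_cons, htc] using hcount
          refine ⟨j, by simpa using hj, by push_cast; ring, by simpa using hget, hcount'⟩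

-- membership in the decorated rounds, given enough fuel
lemma tri_mem (d : PySem.Dict Int (List Int)) (cids : List Int) :
    ∀ (fuel k0 : Nat), (cids.map (fun c => (d.getD c []).length - k0)).sum < fuel →
      ∀ x, x ∈ pvTriRounds d cids k0 fuel ↔
        ∃ c ∈ cids, ∃ r : Nat, k0 ≤ r ∧ r < (d.getD c []).length ∧
          x = ((r : Int), c, (d.getD c []).getD r 0) := by
  intro fuel
  induction fuel with
  | zero => intro k0 hfuel; exact absurd hfuel (Nat.not_lt_zero _)
  | succ fuel ih =>
    intro k0 hfuel x
    by_cases hr : pvTriRound d cids k0 = []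
    · have hall : ∀ c ∈ cids, (d.getD c []).length ≤ k0 := by
        intro c hc
        have hfilter : cids.filter (fun c => decide (k0 < (d.getD c []).length)) = [] := by
          have h' := hr
          unfold pvTriRound at h'
          exact List.map_eq_nil_iff.mp h'
        have := List.filter_eq_nil_iff.mp hfilter c hc
        simpa using this
      simp only [pvTriRounds, if_pos hr, List.not_mem_nil, false_iff]
      rintro ⟨c, hc, r, hk0r, hrlen, -⟩
      exact absurd hrlen (by have := hall c hc; omega)
    · have hwit : ∃ c ∈ cids, k0 < (d.getD c []).length := by
        obtain ⟨p, hp⟩ := List.exists_mem_of_ne_nil _ hr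
        unfold pvTriRound at hp
        obtain ⟨c, hcf, -⟩ := List.mem_map.mp hp
        exact ⟨c, (List.mem_filter.mp hcf).1, by simpa using (List.mem_filter.mp hcf).2⟩
      have hstep : (cids.map (fun c => (d.getD c []).length - (k0 + 1))).sum <
          (cids.map (fun c => (d.getD c []).length - k0)).sum := by
        obtain ⟨c, hc, hck⟩ := hwit
        apply List.sum_lt_sum
        · intro b _; omega
        · exact ⟨c, hc, by omega⟩
      simp only [pvTriRounds, if_neg hr, List.mem_append]
      rw [ih (k0 + 1) (by omega) x]
      have hround : x ∈ pvTriRound d cids k0 ↔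
          ∃ c ∈ cids, k0 < (d.getD c []).length ∧
            x = ((k0 : Int), c, (d.getD c []).getD k0 0) := by
        unfold pvTriRound
        simp only [List.mem_map, List.mem_filter, decide_eq_true_eq]
        constructor
        · rintro ⟨c, ⟨hc, hlen⟩, rfl⟩; exact ⟨c, hc, hlen, rfl⟩
        · rintro ⟨c, hc, hlen, rfl⟩; exact ⟨c, ⟨hc, hlen⟩, rfl⟩
      rw [hround]
      constructor
      · rintro (⟨c, hc, hlen, rfl⟩ | ⟨c, hc, r, hk0r, hrlen, rfl⟩)
        · exact ⟨c, hc, k0, le_refl _, hlen, rfl⟩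
        · exact ⟨c, hc, r, by omega, hrlen, rfl⟩
      · rintro ⟨c, hc, r, hk0r, hrlen, rfl⟩
        by_cases hrk : r = k0
        · subst hrk
          exact Or.inl ⟨c, hc, hrlen, rfl⟩
        · exact Or.inr ⟨c, hc, r, by omega, hrlen, rfl⟩

-- the decorated rounds are strictly increasing in (offset, class)
lemma tri_pairwise (d : PySem.Dict Int (List Int)) (cids : List Int)
    (hc : cids.Pairwise (· < ·)) :
    ∀ (fuel k : Nat), (pvTriRounds d cids k fuel).Pairwise pvLex ∧
      ∀ x ∈ pvTriRounds d cids k fuel, (k : Int) ≤ x.1 := by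
  intro fuel
  induction fuel with
  | zero => intro k; simp [pvTriRounds]
  | succ fuel ih =>
    intro k
    by_cases hr : pvTriRound d cids k = []
    · simp [pvTriRounds, hr]
    · have hroundpw : (pvTriRound d cids k).Pairwise pvLex := by
        unfold pvTriRound
        rw [List.pairwise_map]
        refine (hc.filter _).imp ?_
        intro a b hab
        right
        exact ⟨rfl, hab⟩
      have hroundfst : ∀ x ∈ pvTriRound d cids k, x.1 = (k : Int) := by
        intro x hx
        unfold pvTriRound at hx
        obtain ⟨c, -, rfl⟩ := List.mem_map.mp hx
        rfl
      obtain ⟨ihpw, ihlb⟩ := ih (k + 1)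
      constructor
      · simp only [pvTriRounds, if_neg hr]
        rw [List.pairwise_append]
        refine ⟨hroundpw, ihpw, ?_⟩
        intro a ha b hb
        left
        have := hroundfst a ha
        have := ihlb b hb
        omega
      · intro x hx
        simp only [pvTriRounds, if_neg hr, List.mem_append] at hx
        rcases hx with hx | hx
        · rw [hroundfst x hx]
        · have := ihlb x hx
          omega

-- insertion keeps the output weakly sorted
lemma insertBy_pairwise (x : Int × Int × Int) (ys : List (Int × Int × Int))
    (h : ys.Pairwise (fun a b => pvBefore b a = false)) :
    (PySem.List.insertBy pvBefore x ys).Pairwise (fun a b => pvBefore b a = false) := by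
  induction ys with
  | nil => simp [PySem.List.insertBy]
  | cons y t ih =>
    rw [List.pairwise_cons] at h
    by_cases hb : pvBefore x y = true
    · have hres : PySem.List.insertBy pvBefore x (y :: t) = x :: y :: t := by
        simp [PySem.List.insertBy, hb]
      rw [hres]
      refine List.Pairwise.cons ?_ (List.Pairwise.cons h.1 h.2)
      intro z hz
      rcases List.mem_cons.mp hz with rfl | hzt
      · simp only [pvBefore, Bool.or_eq_true, Bool.and_eq_true, Bool.not_eq_true',
          decide_eq_true_eq, decide_eq_false_iff_not, Bool.or_eq_false_iff,
          Bool.and_eq_false_iff, Bool.not_eq_false'] at hb ⊢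
        omega
      · have hyz := h.1 z hzt
        simp only [pvBefore, Bool.or_eq_true, Bool.and_eq_true, Bool.not_eq_true',
          decide_eq_true_eq, decide_eq_false_iff_not, Bool.or_eq_false_iff,
          Bool.and_eq_false_iff, Bool.not_eq_false'] at hb hyz ⊢
        omega
    · have hbf : pvBefore x y = false := by
        simpa using hb
      have hres : PySem.List.insertBy pvBefore x (y :: t) =
          y :: PySem.List.insertBy pvBefore x t := by
        simp [PySem.List.insertBy, hbf]
      rw [hres]
      refine List.Pairwise.cons ?_ (ih h.2)
      intro z hz
      rcases (PySem.List.insertBy_mem_iff pvBefore x z t).mp hz with rfl | hzt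
      · exact hbf
      · exact h.1 z hzt

lemma sorted2_weak (xs : List (Int × Int × Int)) :
    (PySem.List.sorted2 xs (fun p => p.1) (fun p => p.2.1) false).Pairwise
      (fun a b => pvBefore b a = false) := by
  have hfold : ∀ (l : List (Int × Int × Int)) (acc : List (Int × Int × Int)),
      acc.Pairwise (fun a b => pvBefore b a = false) →
      (l.foldl (fun acc x => PySem.List.insertBy pvBefore x acc) acc).Pairwise
        (fun a b => pvBefore b a = false) := by
    intro l
    induction l with
    | nil => intro acc h; exact h
    | cons x t ih => intro acc h; exact ih _ (insertBy_pairwise x acc h)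
  exact hfold xs [] (by simp)

-- a permutation of a pvLex-sorted list that is itself pvLex-sorted is that list
lemma eq_of_perm_pairwise :
    ∀ (l₁ l₂ : List (Int × Int × Int)), l₁.Perm l₂ →
      l₁.Pairwise pvLex → l₂.Pairwise pvLex → l₁ = l₂ := by
  intro l₁
  induction l₁ with
  | nil => intro l₂ hp _ _; exact (hp.nil_eq).symm ▸ rfl
  | cons a t₁ ih =>
    intro l₂ hp h1 h2
    cases l₂ with
    | nil => exact absurd hp.symm (by simp)
    | cons b t₂ =>
      by_cases hab : a = b
      · subst hab
        rw [ih t₂ (hp.cons_inv) (List.pairwise_cons.mp h1).2 (List.pairwise_cons.mp h2).2]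
      · exfalso
        have ha2 : a ∈ b :: t₂ := hp.mem_iff.mp (List.mem_cons_self)
        have hb1 : b ∈ a :: t₁ := hp.mem_iff.mpr (List.mem_cons_self)
        have hat2 : a ∈ t₂ := by
          rcases List.mem_cons.mp ha2 with h | h
          · exact absurd h hab
          · exact h
        have hbt1 : b ∈ t₁ := by
          rcases List.mem_cons.mp hb1 with h | h
          · exact absurd h.symm hab
          · exact h
        have hab1 : pvLex a b := (List.pairwise_cons.mp h1).1 b hbt1
        have hba2 : pvLex b a := (List.pairwise_cons.mp h2).1 a hat2
        unfold pvLex at hab1 hba2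
        omega

-- the keyed list is a permutation of the decorated rounds, so sorting it gives exactly them
lemma sorted_keyed_eq_tri (targets : List Int) :
    PySem.List.sorted2 (pvKeyed targets) (fun p => p.1) (fun p => p.2.1) false =
      pvTriRounds (pvBuild targets)
        (PySem.List.sorted (pvBuild targets).keys (fun x => x) false)
        0 (targets.length + 1) := by
  set d := pvBuild targets with hd
  set cids := PySem.List.sorted (pvBuild targets).keys (fun x => x) false with hcids
  set tri := pvTriRounds d cids 0 (targets.length + 1) with htri
  have hbucket : ∀ c, d.getD c [] =
      ((PySem.List.enumerate targets 0).filter (fun p => p.2 == c)).map (·.1) := by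
    intro c
    rw [hd]
    unfold pvBuild
    rw [build_getD_aux]
    simp
  have hcmem : ∀ c, c ∈ cids ↔ c ∈ targets := by
    intro c
    rw [hcids, PySem.List.mem_sorted, keys_build, PySem.Set.mem_ofList]
  have hcpw : cids.Pairwise (· < ·) := by
    rw [hcids, keys_build]
    exact PySem.List.sorted_ofList_pairwise_lt targets
  have hfuel : (cids.map (fun c => (d.getD c []).length - 0)).sum < targets.length + 1 := by
    have h1 : (cids.map (fun c => (d.getD c []).length)).sum ≤ targets.length := by
      rw [hcids, hd]
      exact sum_buckets_le targets
    have h2 : (cids.map (fun c => (d.getD c []).length - 0)).sum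
        = (cids.map (fun c => (d.getD c []).length)).sum := by
      simp
    omega
  have htmem := tri_mem d cids (targets.length + 1) 0 hfuel
  have htpw : tri.Pairwise pvLex := (tri_pairwise d cids hcpw (targets.length + 1) 0).1
  -- membership equivalence between the keyed list and the decorated rounds
  have hmem : ∀ x, x ∈ pvKeyed targets ↔ x ∈ tri := by
    intro x
    rw [keyed_closed, htri, htmem x]
    simp only [List.mem_map, List.mem_range]
    constructor
    · rintro ⟨j, hj, rfl⟩
      set c := targets.getD j 0 with hc
      have hcin : c ∈ targets := by
        rw [hc, List.getD_eq_getElem targets 0 hj]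
        exact List.getElem_mem hj
      have hchar := (bucket_char c targets 0 ((targets.take j).count c) ((j : Int))).mpr
        ⟨j, hj, by ring, rfl, rfl⟩
      refine ⟨c, (hcmem c).mpr hcin, (targets.take j).count c, Nat.zero_le _, ?_, ?_⟩
      · rw [hbucket c]
        exact hchar.1
      · unfold pvTriple
        rw [hbucket c, hchar.2]
    · rintro ⟨c, hc, r, -, hrlen, rfl⟩
      have hchar := (bucket_char c targets 0 r ((d.getD c []).getD r 0)).mp
        ⟨by rw [← hbucket c]; exact hrlen, by rw [← hbucket c]⟩
      obtain ⟨j, hj, hi, hget, hcount⟩ := hchar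
      refine ⟨j, hj, ?_⟩
      unfold pvTriple
      rw [hget, hcount, hi]
      simp
  -- both lists are duplicate-free
  have hnodup_keyed : (pvKeyed targets).Nodup := by
    apply List.Nodup.of_map (fun p => p.2.2)
    rw [keyed_closed, List.map_map]
    have : ((fun p => p.2.2) ∘ pvTriple targets) = (fun j : Nat => (j : Int)) := by
      funext j
      simp [pvTriple]
    rw [this]
    refine List.Nodup.map ?_ List.nodup_range
    intro a b h
    simpa using h
  have hnodup_tri : tri.Nodup := by
    refine htpw.imp ?_
    intro a b hab
    unfold pvLex at hab
    intro hEq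
    subst hEq
    omega
  -- hence a permutation, and sorting the permutation of a sorted list returns it
  have hperm : (pvKeyed targets).Perm tri :=
    (List.perm_ext_iff_of_nodup hnodup_keyed hnodup_tri).mpr hmem
  have hsortperm : (PySem.List.sorted2 (pvKeyed targets)
      (fun p => p.1) (fun p => p.2.1) false).Perm tri :=
    (PySem.List.sorted2_perm _ _ _ _).trans hperm
  -- the sorted output is weakly sorted, and key-distinct by the permutation, so pvLex-sorted
  have hweak := sorted2_weak (pvKeyed targets)
  have hkeyne : (PySem.List.sorted2 (pvKeyed targets)
      (fun p => p.1) (fun p => p.2.1) false).Pairwise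
        (fun a b => (a.1, a.2.1) ≠ (b.1, b.2.1)) := by
    have hmapnd : ((PySem.List.sorted2 (pvKeyed targets)
        (fun p => p.1) (fun p => p.2.1) false).map (fun p => (p.1, p.2.1))).Nodup := by
      rw [(hsortperm.map (fun p => (p.1, p.2.1))).nodup_iff]
      refine List.Nodup.map_on ?_ hnodup_tri
      intro a ha b hb hkey
      -- keys are strictly increasing along tri, so equal keys force equal elements
      by_contra hne
      rcases (List.getElem_of_mem ha) with ⟨ia, hia, rfl⟩
      rcases (List.getElem_of_mem hb) with ⟨ib, hib, rfl⟩
      obtain ⟨h1, h2⟩ := Prod.ext_iff.mp hkey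
      simp only at h1 h2
      rcases Nat.lt_trichotomy ia ib with h | h | h
      · have := List.pairwise_iff_getElem.mp htpw ia ib hia hib h
        unfold pvLex at this
        omega
      · exact hne (by subst h; rfl)
      · have := List.pairwise_iff_getElem.mp htpw ib ia hib hia h
        unfold pvLex at this
        omega
    rw [List.nodup_iff_pairwise_ne] at hmapnd
    exact List.pairwise_map.mp hmapnd
  have hstrict : (PySem.List.sorted2 (pvKeyed targets)
      (fun p => p.1) (fun p => p.2.1) false).Pairwise pvLex := by
    refine ((hweak.and hkeyne).imp ?_)
    rintro a b ⟨hw, hne⟩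
    simp only [pvBefore, Bool.or_eq_false_iff, Bool.and_eq_false_iff,
      Bool.not_eq_false', decide_eq_false_iff_not, decide_eq_true_eq] at hw
    unfold pvLex
    have hne' : a.1 ≠ b.1 ∨ a.2.1 ≠ b.2.1 := by
      rcases eq_or_ne a.1 b.1 with h1 | h1
      · rcases eq_or_ne a.2.1 b.2.1 with h2 | h2
        · exact absurd (by rw [h1, h2]) hne
        · exact Or.inr h2
      · exact Or.inl h1
    rcases hne' with h | h <;> omega
  exact eq_of_perm_pairwise _ _ hsortperm hstrict htpw

-- ===== VERDICT (by name: the statement is the Claim_ definition above) =====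
theorem balanced_indices_py_spec : Claim_equal_balanced_indices_py := by
  unfold Claim_equal_balanced_indices_py
  intro targets limit _
  unfold Spec_balanced_indices_py
  simp only [balanced_indices_py, balanced_indices_py_alt]
  have H0 : ([] : List Int).length +
      (pvRounds (pvBuild targets)
        (PySem.List.sorted (pvBuild targets).keys (fun x => x) false)
        0 (targets.length + 1)).length ≤ targets.length := by
    have h1 := rounds_le (pvBuild targets)
      (PySem.List.sorted (pvBuild targets).keys (fun x => x) false)
      (targets.length + 1) 0
    simp only [Nat.sub_zero] at h1
    have h2 := sum_buckets_le targets
    simp only [List.length_nil, Nat.zero_add]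
    omega
  rw [loopA_spec _ _ _ _ _ _ _ H0]
  rw [sorted_keyed_eq_tri targets]
  rw [PySem.List.slice_to _ (le_max_left 0 limit)]
  rw [← rounds_eq_tri, ← List.map_take]
  have : (max 0 limit).toNat = limit.toNat := by omega
  rw [this]
  simp
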